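-- pv_equiv track=rewrite | github.com/Notum-Robotics/ClusterFlock | nCore/mission/parsing.py | _fix_json_newlines
-- ===== SOURCE A (Python) =====
-- def _fix_json_newlines(text):
--     """Replace literal newlines/tabs inside JSON string values with escape sequences.
--     Also handles unescaped double-quotes inside strings (common in HTML content).
--     Uses lookahead to distinguish string boundary quotes from internal literals."""
--     result = []
--     in_string = False
--     escape = False
--     n = len(text)
--     for i, ch in enumerate(text):
--         if escape:
--             result.append(ch)
--             escape = False
--             continue
--         if ch == '\\' and in_string:
--             result.append(ch)
--             escape = True
--             continue
--         if ch == '"':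
--             if not in_string:
--                 in_string = True
--                 result.append(ch)
--                 continue
--             else:
--                 # Lookahead: a real closing quote is followed by , } ] : or end-of-text
--                 j = i + 1
--                 while j < n and text[j] in ' \t\r\n':
--                     j += 1
--                 if j >= n or text[j] in ',}]:':
--                     in_string = False
--                     result.append(ch)
--                     continue
--                 else:
--                     # Unescaped quote inside a string — escape it
--                     result.append('\\"')
--                     continue
--         if in_string:
--             if ch == '\n':
--                 result.append('\\n')
--                 continue
--             if ch == '\r':
--                 result.append('\\r')
--                 continue
--             if ch == '\t':
--                 result.append('\\t')
--                 continue
--         result.append(ch)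
--     return ''.join(result)
-- ===== SOURCE B (Python) =====
-- def _fix_json_newlines(text):
--     """Segment-based rewrite: jump between quotes with str.find, scan each
--     string body once to locate its real closing quote, and escape the
--     extracted body in a separate pass (no per-character state machine in
--     the driver)."""
--     out = []
--     i = 0
--     while True:
--         j = text.find('"', i)
--         if j == -1:
--             out.append(text[i:])
--             break
--         out.append(text[i:j + 1])
--         content, k = _scan_string(text, j + 1)
--         out.append(_escape_content(content))
--         if k is None:
--             break
--         out.append('"')
--         i = k
--     return ''.join(out)
--
--
-- def _scan_string(text, i):
--     """From index i (just after an opening quote) find the real closing quote.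
--     Returns (raw body, index after the closing quote) or (rest, None)."""
--     n = len(text)
--     start = i
--     while i < n:
--         c = text[i]
--         if c == '\\':
--             i += 2 if i + 1 < n else 1
--         elif c == '"':
--             if _closes(text, i + 1):
--                 return text[start:i], i + 1
--             i += 1
--         else:
--             i += 1
--     return text[start:], None
--
--
-- def _closes(text, j):
--     """True if position j (after a quote) looks like the end of the value:
--     only whitespace up to one of , } ] : or end-of-text."""
--     n = len(text)
--     while j < n and text[j] in ' \t\r\n':
--         j += 1
--     return j >= n or text[j] in ',}]:'
--
--
-- def _escape_content(s):
--     """Escape a raw string body: keep backslash pairs, escape quotes and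
--     literal newlines/tabs/CRs."""
--     out = []
--     i = 0
--     n = len(s)
--     while i < n:
--         c = s[i]
--         if c == '\\':
--             out.append(s[i:i + 2])
--             i += 2
--         elif c == '"':
--             out.append('\\"')
--             i += 1
--         elif c == '\n':
--             out.append('\\n')
--             i += 1
--         elif c == '\r':
--             out.append('\\r')
--             i += 1
--         elif c == '\t':
--             out.append('\\t')
--             i += 1
--         else:
--             out.append(c)
--             i += 1
--     return ''.join(out)
-- ===== Notes on version B (the rewrite author's own statement) =====
-- stated objective: alternative
-- what changed: Replaces A's single char-by-char state machine (in_string/escape flags) with a segment-based driver: str.find jumps to each opening quote, a boundary scanner locates the real closing quote (backslash consumes two chars), and the extracted string body is escaped in a separate pass.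
import Mathlib
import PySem

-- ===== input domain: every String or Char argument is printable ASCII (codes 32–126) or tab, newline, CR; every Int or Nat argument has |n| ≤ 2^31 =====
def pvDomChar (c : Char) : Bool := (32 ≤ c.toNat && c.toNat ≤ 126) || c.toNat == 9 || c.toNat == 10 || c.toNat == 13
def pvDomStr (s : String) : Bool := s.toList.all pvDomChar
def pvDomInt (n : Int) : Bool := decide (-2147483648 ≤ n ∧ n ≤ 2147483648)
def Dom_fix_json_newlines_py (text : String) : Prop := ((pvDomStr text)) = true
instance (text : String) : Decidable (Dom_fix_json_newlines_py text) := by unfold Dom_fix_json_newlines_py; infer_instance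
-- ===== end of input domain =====

-- B rewrites A's char-by-char state machine as a segment splitter: jump to the next
-- quote, scan the string body once for its real closing quote, escape the extracted
-- body in a separate pass (alternative decomposition, same cost).

-- ===== PORT A =====

-- A's inner `while j < n and text[j] in ' \t\r\n': j += 1` lookahead,
-- returning the first non-whitespace character of the remaining text (none = end)
def pvSkipWs : List Char → Option Char
  | [] => none
  | c :: t =>
    if c = ' ' || c = '\t' || c = '\r' || c = '\n' then pvSkipWs t else some c

-- A's main loop: state = (in_string, escape); lookahead rescans the tail at each quote
def pvGoA : List Char → Bool → Bool → List Char
  | [], _, _ => []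
  | c :: t, inS, esc =>
    if esc then c :: pvGoA t inS false
    else if c = '\\' && inS then c :: pvGoA t inS true
    else if c = '"' then
      if !inS then c :: pvGoA t true esc
      else
        match pvSkipWs t with
        | none => c :: pvGoA t false esc
        | some d =>
          if d = ',' || d = '}' || d = ']' || d = ':' then c :: pvGoA t false esc
          else '\\' :: '"' :: pvGoA t inS esc
    else if inS then
      if c = '\n' then '\\' :: 'n' :: pvGoA t inS esc
      else if c = '\r' then '\\' :: 'r' :: pvGoA t inS esc
      else if c = '\t' then '\\' :: 't' :: pvGoA t inS esc
      else c :: pvGoA t inS esc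
    else c :: pvGoA t inS esc

def fix_json_newlines_py (text : String) : String :=
  String.mk (pvGoA text.toList false false)

-- ===== PORT B =====

-- Source B's `text.find('"', i)` plus slicing: split at the first quote → (prefix, rest after the quote)
def pvSplitQuote : List Char → List Char × Option (List Char)
  | [] => ([], none)
  | c :: t =>
    if c = '"' then ([], some t)
    else
      let (p, r) := pvSplitQuote t
      (c :: p, r)

-- Source B's _closes: only whitespace up to one of , } ] : or end-of-text
def pvCloses : List Char → Bool
  | [] => true
  | c :: t =>
    if c = ' ' || c = '\t' || c = '\r' || c = '\n' then pvCloses t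
    else c = ',' || c = '}' || c = ']' || c = ':'

-- Source B's _scan_string: raw string body plus the rest after the real closing quote
-- (a backslash consumes two characters, mirroring `i += 2`)
def pvScanString : List Char → List Char × Option (List Char)
  | [] => ([], none)
  | c :: t =>
    if c = '\\' then
      match t with
      | [] => (['\\'], none)
      | d :: t' =>
        let (cnt, r) := pvScanString t'
        ('\\' :: d :: cnt, r)
    else if c = '"' then
      if pvCloses t then ([], some t)
      else
        let (cnt, r) := pvScanString t
        (c :: cnt, r)
    else
      let (cnt, r) := pvScanString t
      (c :: cnt, r)

-- Source B's _escape_content: backslash pairs verbatim, escape quotes and control chars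
def pvEscBody : List Char → List Char
  | [] => []
  | c :: t =>
    if c = '\\' then
      match t with
      | [] => ['\\']
      | d :: t' => '\\' :: d :: pvEscBody t'
    else if c = '"' then '\\' :: '"' :: pvEscBody t
    else if c = '\n' then '\\' :: 'n' :: pvEscBody t
    else if c = '\r' then '\\' :: 'r' :: pvEscBody t
    else if c = '\t' then '\\' :: 't' :: pvEscBody t
    else c :: pvEscBody t

-- (termination facts for pvDrive; cited by its decreasing_by)
theorem pvSplitQuote_shrink : ∀ (cs t : List Char), (pvSplitQuote cs).2 = some t → t.length < cs.length := by
  intro cs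
  induction cs with
  | nil => intro t h; simp [pvSplitQuote] at h
  | cons c cs ih =>
    intro t h
    by_cases hc : c = '"'
    · subst hc; simp [pvSplitQuote] at h; subst h; simp
    · cases hps : pvSplitQuote cs with
      | mk p r =>
        simp only [pvSplitQuote, if_neg hc, hps] at h
        have := ih t (by rw [hps]; simpa using h)
        simp; omega

theorem pvScanString_shrink : ∀ (cs r : List Char), (pvScanString cs).2 = some r → r.length < cs.length := by
  intro cs
  induction cs using pvScanString.induct with
  | case1 => intro s h; simp [pvScanString] at h
  | case2 =>
    intro s h
    rw [pvScanString.eq_def] at h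
    simp at h
  | case3 c t cnt r heq ih =>
    intro s h
    rw [pvScanString.eq_def] at h
    simp [heq] at h
    have := ih s (by rw [heq]; simpa using h)
    simp; omega
  | case4 t hcl _ =>
    intro s h
    rw [pvScanString.eq_def] at h
    simp [hcl] at h
    subst h; simp
  | case5 t hcl cnt r heq _ ih =>
    intro s h
    rw [pvScanString.eq_def] at h
    simp [hcl, heq] at h
    have := ih s (by rw [heq]; simpa using h)
    simp; omega
  | case6 c t hc hq cnt r heq ih =>
    intro s h
    rw [pvScanString.eq_def] at h
    simp [hc, hq, heq] at h
    have := ih s (by rw [heq]; simpa using h)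
    simp; omega

-- Source B's driver loop: alternate between outside-string jumps and string bodies
def pvDrive (cs : List Char) : List Char :=
  match hsq : pvSplitQuote cs with
  | (pre, none) => pre
  | (pre, some t) =>
    match hss : pvScanString t with
    | (cnt, none) => pre ++ '"' :: pvEscBody cnt
    | (cnt, some rest) => pre ++ '"' :: (pvEscBody cnt ++ '"' :: pvDrive rest)
termination_by cs.length
decreasing_by
  have h1 : t.length < cs.length := pvSplitQuote_shrink cs t (by rw [hsq])
  have h2 : rest.length < t.length := pvScanString_shrink t rest (by rw [hss])
  omega

def fix_json_newlines_py_alt (text : String) : String :=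
  String.mk (pvDrive text.toList)

-- ===== PRECONDITION & SPEC =====
def Spec_fix_json_newlines_py (text : String) (out : String) : Prop := out = fix_json_newlines_py_alt text
instance (text : String) (out : String) : Decidable (Spec_fix_json_newlines_py text out) := by unfold Spec_fix_json_newlines_py; infer_instance

-- ===== CLAIM (what is proved, stated in full; the proofs are below) =====
def Claim_equal_fix_json_newlines_py : Prop := ∀ (text : String), Dom_fix_json_newlines_py text → Spec_fix_json_newlines_py text (fix_json_newlines_py text)

-- ===== LEMMAS AND PROOFS =====

-- equation lemmas for pvScanString (its compiled equations do not fire under simp)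
theorem pvScan_slash (d : Char) (t : List Char) :
    pvScanString ('\\' :: d :: t) = ('\\' :: d :: (pvScanString t).1, (pvScanString t).2) := by
  rw [pvScanString.eq_def]
  rcases hps : pvScanString t with ⟨a, b⟩
  simp [hps]

theorem pvScan_quote_close (t : List Char) (hcl : pvCloses t = true) :
    pvScanString ('"' :: t) = ([], some t) := by
  rw [pvScanString.eq_def]; simp [hcl]

theorem pvScan_quote_inner (t : List Char) (hcl : ¬ pvCloses t = true) :
    pvScanString ('"' :: t) = ('"' :: (pvScanString t).1, (pvScanString t).2) := by
  rw [pvScanString.eq_def]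
  rcases hps : pvScanString t with ⟨a, b⟩
  simp [hps, hcl]

theorem pvScan_other (c : Char) (t : List Char) (hc : ¬ c = '\\') (hq : ¬ c = '"') :
    pvScanString (c :: t) = (c :: (pvScanString t).1, (pvScanString t).2) := by
  rw [pvScanString.eq_def]
  rcases hps : pvScanString t with ⟨a, b⟩
  simp [hps, hc, hq]

-- equation lemmas for pvEscBody
theorem pvEsc_quote (t : List Char) : pvEscBody ('"' :: t) = '\\' :: '"' :: pvEscBody t := by
  rw [pvEscBody.eq_def]; simp

theorem pvEsc_nl (t : List Char) : pvEscBody ('\n' :: t) = '\\' :: 'n' :: pvEscBody t := by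
  rw [pvEscBody.eq_def]; simp

theorem pvEsc_cr (t : List Char) : pvEscBody ('\r' :: t) = '\\' :: 'r' :: pvEscBody t := by
  rw [pvEscBody.eq_def]; simp

theorem pvEsc_tab (t : List Char) : pvEscBody ('\t' :: t) = '\\' :: 't' :: pvEscBody t := by
  rw [pvEscBody.eq_def]; simp

theorem pvEsc_pair (d : Char) (t : List Char) : pvEscBody ('\\' :: d :: t) = '\\' :: d :: pvEscBody t := rfl

theorem pvEsc_other (c : Char) (t : List Char) (hc : ¬ c = '\\') (hq : ¬ c = '"')
    (hn : ¬ c = '\n') (hr : ¬ c = '\r') (ht : ¬ c = '\t') :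
    pvEscBody (c :: t) = c :: pvEscBody t := by
  rw [pvEscBody.eq_def]
  simp [hc, hq, hn, hr, ht]

-- A's lookahead condition agrees with B's pvCloses
theorem pvCloses_skipWs (t : List Char) :
    pvCloses t = (match pvSkipWs t with
      | none => true
      | some d => d = ',' || d = '}' || d = ']' || d = ':') := by
  induction t with
  | nil => rfl
  | cons c t ih =>
    simp only [pvCloses, pvSkipWs]
    split_ifs with h
    · exact ih
    · rfl

-- inside a string, A's loop = B's (scan body, escape body) composition
theorem pvGoA_inside : ∀ (t : List Char),
    pvGoA t true false
      = pvEscBody (pvScanString t).1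
        ++ (match (pvScanString t).2 with
            | none => []
            | some r => '"' :: pvGoA r false false) := by
  intro t
  induction t using pvScanString.induct with
  | case1 => rfl
  | case2 =>
    rw [pvScanString.eq_def]
    simp [pvGoA, pvEscBody]
  | case3 c t cnt r heq ih =>
    rw [heq] at ih
    rw [pvScan_slash, heq]
    simp only [pvGoA]
    simp [ih, pvEsc_pair]
  | case4 t hcl _ =>
    have hsw := hcl
    rw [pvCloses_skipWs] at hsw
    rw [pvScan_quote_close t hcl]
    simp only [pvGoA]
    cases h : pvSkipWs t with
    | none => simp [h, pvEscBody]
    | some d =>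
      rw [h] at hsw; simp at hsw
      simp [h, hsw, pvEscBody]
  | case5 t hcl cnt r heq _ ih =>
    have hsw := hcl
    rw [pvCloses_skipWs] at hsw
    rw [heq] at ih
    rw [pvScan_quote_inner t hcl, heq]
    simp only [pvGoA]
    cases h : pvSkipWs t with
    | none => rw [h] at hsw; simp at hsw
    | some d =>
      rw [h] at hsw
      simp only [Bool.not_eq_true, Bool.or_eq_false_iff, decide_eq_false_iff_not] at hsw
      obtain ⟨⟨⟨h1, h2⟩, h3⟩, h4⟩ := hsw
      simp [h, h1, h2, h3, h4, pvEsc_quote, ih]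
  | case6 c t hc hq cnt r heq ih =>
    rw [heq] at ih
    rw [pvScan_other c t hc hq, heq]
    by_cases hn : c = '\n'
    · subst hn
      simp [pvGoA, pvEsc_nl, ih]
    · by_cases hr : c = '\r'
      · subst hr
        simp [pvGoA, pvEsc_cr, ih]
      · by_cases ht : c = '\t'
        · subst ht
          simp [pvGoA, pvEsc_tab, ih]
        · rw [pvEsc_other c cnt hc hq hn hr ht]
          simp [pvGoA, hc, hq, hn, hr, ht, ih]

-- outside a string, A's loop copies up to the next quote = B's pvSplitQuote
theorem pvGoA_outside : ∀ (cs : List Char),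
    pvGoA cs false false
      = (pvSplitQuote cs).1
        ++ (match (pvSplitQuote cs).2 with
            | none => []
            | some t => '"' :: pvGoA t true false) := by
  intro cs
  induction cs with
  | nil => rfl
  | cons c t ih =>
    by_cases hq : c = '"'
    · subst hq; simp [pvGoA, pvSplitQuote]
    · cases hps : pvSplitQuote t with
      | mk p r =>
        rw [hps] at ih
        simp [pvGoA, pvSplitQuote, hq, hps, ih]

-- the whole programs agree, by strong induction on the length
theorem pvDrive_eq : ∀ (n : ℕ) (cs : List Char), cs.length ≤ n → pvDrive cs = pvGoA cs false false := by
  intro n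
  induction n with
  | zero =>
    intro cs h
    have hcs : cs = [] := by cases cs <;> simp_all
    subst hcs
    rw [pvDrive]
    simp [pvSplitQuote, pvGoA]
  | succ n ih =>
    intro cs hlen
    rw [pvGoA_outside, pvDrive]
    cases hps : pvSplitQuote cs with
    | mk pre q =>
      cases q with
      | none => simp
      | some t =>
        have ht : t.length < cs.length := pvSplitQuote_shrink cs t (by rw [hps])
        simp only []
        simp only [pvGoA_inside]
        cases hss : pvScanString t with
        | mk cnt rr =>
          cases rr with
          | none => simp
          | some rest =>
            have hr : rest.length < t.length := pvScanString_shrink t rest (by rw [hss])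
            simp [ih rest (by omega)]

-- ===== VERDICT (by name: the statement is the Claim_ definition above) =====
theorem fix_json_newlines_py_spec : Claim_equal_fix_json_newlines_py := by
  intro text _
  unfold Spec_fix_json_newlines_py fix_json_newlines_py fix_json_newlines_py_alt
  rw [pvDrive_eq text.toList.length text.toList le_rfl]
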